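-- pv_equiv track=rewrite | github.com/pypi-data/pypi-mirror-373 | packages/hilbert-quantization/hilbert_quantization-1.3.0.tar.gz/hilbert_quantization-1.3.0/hilbert_quantization/utils/padding.py | _end_fill_strategy
-- ===== SOURCE A (Python) =====
-- from typing import List, Tuple, Dict, Any
--
-- def _end_fill_strategy(param_count: int, dimensions: Tuple[int, int]) -> List[Tuple[int, int]]:
--     """Fill padding at the end of the parameter space in row-major order."""
--     width, height = dimensions
--     total_space = width * height
--     padding_count = total_space - param_count
--
--     padding_positions = []
--     for i in range(padding_count):
--         pos_index = total_space - 1 - i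
--         y = pos_index // width
--         x = pos_index % width
--         padding_positions.append((x, y))
--
--     return padding_positions
-- ===== SOURCE B (Python) =====
-- def _end_fill_strategy(param_count, dimensions):
--     """Fill padding at the end of the parameter space in row-major order."""
--     width, height = dimensions
--     n = width * height - param_count
--     if n <= 0:
--         return []
--     # first padded cell in row-major order is linear index param_count
--     y0, x0 = divmod(param_count, width)
--     out = []
--     for y in range(height - 1, y0, -1):          # full trailing rows, bottom-up
--         out.extend((x, y) for x in range(width - 1, -1, -1))
--     out.extend((x, y0) for x in range(width - 1, x0 - 1, -1))  # partial first padded row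
--     return out
-- ===== Notes on version B (the rewrite author's own statement) =====
-- stated objective: alternative
-- what changed: B does one divmod to locate the first padded cell, then emits the padding row-by-row (full trailing rows via nested ranges plus one partial row), instead of A's single loop computing floor-division and modulo per position.
-- outside the precondition, e.g. on _end_fill_strategy(-10, (-2, 3)): A returns [(-1, 3), (0, 4), (-1, 4), (0, 5)], B returns []
import Mathlib
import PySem

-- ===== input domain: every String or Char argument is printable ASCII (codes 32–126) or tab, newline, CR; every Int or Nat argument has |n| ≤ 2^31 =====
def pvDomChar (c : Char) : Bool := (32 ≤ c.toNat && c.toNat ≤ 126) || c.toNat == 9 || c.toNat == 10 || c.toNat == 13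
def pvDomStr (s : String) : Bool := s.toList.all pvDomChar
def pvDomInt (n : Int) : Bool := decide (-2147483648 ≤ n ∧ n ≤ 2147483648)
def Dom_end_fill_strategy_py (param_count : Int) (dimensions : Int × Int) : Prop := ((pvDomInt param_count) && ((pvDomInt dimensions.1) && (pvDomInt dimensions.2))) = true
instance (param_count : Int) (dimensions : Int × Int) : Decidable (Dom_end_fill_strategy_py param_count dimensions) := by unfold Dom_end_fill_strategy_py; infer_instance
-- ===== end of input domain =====

-- B locates the first padded cell with one divmod and then emits the padding
-- row-by-row (full trailing rows plus a partial row) instead of A's per-position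
-- floor division/modulo loop; same O(n) cost, no speed claim.


-- ===== PORT A =====
def end_fill_strategy_py (param_count : Int) (dimensions : Int × Int) : List (Int × Int) :=
  let width := dimensions.1
  let _height := dimensions.2
  let total_space := width * dimensions.2
  let padding_count := total_space - param_count
  ((PySem.List.pyRange 0 padding_count 1).foldl
    (fun acc i =>
      let pos_index := total_space - 1 - i
      acc.push (PySem.Int.mod pos_index width, PySem.Int.floordiv pos_index width))
    (#[] : Array (Int × Int))).toList

-- ===== PORT B =====
def end_fill_strategy_py_alt (param_count : Int) (dimensions : Int × Int) : List (Int × Int) :=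
  let w := dimensions.1
  let h := dimensions.2
  let n := w * h - param_count
  if n ≤ 0 then []
  else
    -- divmod(param_count, width)
    let y0 := PySem.Int.floordiv param_count w
    let x0 := PySem.Int.mod param_count w
    let out := (PySem.List.pyRange (h - 1) y0 (-1)).foldl
      (fun acc y => acc ++ ((PySem.List.pyRange (w - 1) (-1) (-1)).map (fun x => (x, y))).toArray)
      (#[] : Array (Int × Int))
    (out ++ ((PySem.List.pyRange (w - 1) (x0 - 1) (-1)).map (fun x => (x, y0))).toArray).toList

-- ===== PRECONDITION & SPEC =====
-- Pre_ excludes inputs whose loop runs with non-positive width: with width = 0 both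
-- programs raise ZeroDivisionError, and with negative width A's floor-division
-- coordinates (sign of the divisor) lie outside any grid — an artefact of a
-- nonsensical negative-width parameter space.
def Pre_end_fill_strategy_py (param_count : Int) (dimensions : Int × Int) : Prop :=
  0 < dimensions.1 ∨ dimensions.1 * dimensions.2 ≤ param_count
instance (param_count : Int) (dimensions : Int × Int) : Decidable (Pre_end_fill_strategy_py param_count dimensions) := by unfold Pre_end_fill_strategy_py; infer_instance

def pvWitness_end_fill_strategy_py : Int × (Int × Int) := (2, (3, 2))

def Spec_end_fill_strategy_py (param_count : Int) (dimensions : Int × Int) (out : List (Int × Int)) : Prop := out = end_fill_strategy_py_alt param_count dimensions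
instance (param_count : Int) (dimensions : Int × Int) (out : List (Int × Int)) : Decidable (Spec_end_fill_strategy_py param_count dimensions out) := by unfold Spec_end_fill_strategy_py; infer_instance

-- ===== CLAIM (what is proved, stated in full; the proofs are below) =====
def Claim_equal_end_fill_strategy_py : Prop := ∀ (param_count : Int) (dimensions : Int × Int), Dom_end_fill_strategy_py param_count dimensions → Pre_end_fill_strategy_py param_count dimensions → Spec_end_fill_strategy_py param_count dimensions (end_fill_strategy_py param_count dimensions)

-- ===== LEMMAS AND PROOFS =====

-- Python-list 'append' as Array.push: the loop's array, read back as a list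
lemma foldl_push_toList {A B : Type} (f : A -> B) : ∀ (l : List A) (acc : Array B),
    (l.foldl (fun a x => a.push (f x)) acc).toList = acc.toList ++ l.map f := by
  intro l
  induction l with
  | nil => intro acc; simp
  | cons x xs ih => intro acc; simp [ih, List.foldl_cons]

-- Python-list 'extend' as Array append: the loop's array, read back as a list
lemma foldl_extend_toList {A B : Type} (g : A -> List B) : ∀ (l : List A) (acc : Array B),
    (l.foldl (fun a x => a ++ (g x).toArray) acc).toList = acc.toList ++ l.flatMap g := by
  intro l
  induction l with
  | nil => intro acc; simp
  | cons x xs ih => intro acc; simp [ih, List.foldl_cons]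

-- (x, y)-pair A computes for a linear index j
def pvPair (w j : Int) : Int × Int := (PySem.Int.mod j w, PySem.Int.floordiv j w)

-- the pairs for k descending linear indices starting at a
def descPairs (w a : Int) (k : Nat) : List (Int × Int) :=
  (List.range k).map (fun (i : Nat) => pvPair w (a - (i : Int)))

-- div/mod of w*q + r for 0 ≤ r < w
lemma pair_divmod (w q r : Int) (hw : 0 < w) (hr : 0 ≤ r) (hrw : r < w) :
    pvPair w (w * q + r) = (r, q) := by
  unfold pvPair
  rw [PySem.Int.mod_eq_emod_of_pos hw, PySem.Int.floordiv_eq_ediv_of_pos hw]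
  have h1 : (w * q + r) % w = r := by
    rw [add_comm, Int.add_mul_emod_self_left, Int.emod_eq_of_lt hr hrw]
  have h2 : (w * q + r) / w = q := by
    rw [add_comm, Int.add_mul_ediv_left _ _ (by omega : w ≠ 0),
      Int.ediv_eq_zero_of_lt hr hrw, zero_add]
  rw [h1, h2]

lemma descPairs_add (w a : Int) (k1 k2 : Nat) :
    descPairs w a (k1 + k2) = descPairs w a k1 ++ descPairs w (a - k1) k2 := by
  unfold descPairs
  rw [List.range_add, List.map_append, List.map_map]
  congr 1
  apply List.map_congr_left
  intro i _
  simp only [Function.comp_apply]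
  congr 1
  push_cast
  ring

-- one row of B, emitted right-to-left down to x-coordinate lo, is a block of descPairs
lemma row_eq (w y lo : Int) (hw : 0 < w) (hlo : 0 ≤ lo) (hlow : lo ≤ w) :
    (PySem.List.pyRange (w - 1) (lo - 1) (-1)).map (fun x => (x, y)) =
      descPairs w (w * y + (w - 1)) (w - lo).toNat := by
  rw [PySem.List.pyRange_neg_one]
  unfold descPairs
  rw [List.map_map]
  have hlen : (w - 1 - (lo - 1)).toNat = (w - lo).toNat := by omega
  rw [hlen]
  apply List.map_congr_left
  intro i hi
  have hi' : (i : Int) < w - lo := by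
    have := List.mem_range.mp hi
    omega
  simp only [Function.comp_apply]
  have e : w * y + (w - 1) - (i : Int) = w * y + ((w - 1) - i) := by ring
  rw [e, pair_divmod w y ((w - 1) - i) hw (by omega) (by omega)]

-- m full rows, bottom row first, starting at top row ytop
lemma rows_eq (w : Int) (hw : 0 < w) : ∀ (m : Nat) (ytop : Int),
    (List.range m).flatMap (fun (k : Nat) => descPairs w (w * (ytop - (k : Int)) + (w - 1)) w.toNat) =
      descPairs w (w * ytop + (w - 1)) (m * w.toNat) := by
  intro m
  induction m with
  | zero => intro ytop; simp [descPairs]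
  | succ p ih =>
    intro ytop
    rw [List.range_succ, List.flatMap_append, ih, Nat.succ_mul, descPairs_add]
    simp only [List.flatMap_cons, List.flatMap_nil, List.append_nil]
    have hwI : ((w.toNat : Nat) : Int) = w := Int.toNat_of_nonneg (le_of_lt hw)
    have hc : w * ytop + (w - 1) - ((p * w.toNat : Nat) : Int) = w * (ytop - (p : Int)) + (w - 1) := by
      rw [Nat.cast_mul, hwI]
      ring
    rw [hc]

-- ===== VERDICT (by name: the statement is the Claim_ definition above) =====
theorem end_fill_strategy_py_spec : Claim_equal_end_fill_strategy_py := by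
  intro pc d _ hpre
  unfold Spec_end_fill_strategy_py end_fill_strategy_py end_fill_strategy_py_alt
  obtain ⟨w, h⟩ := d
  simp only [foldl_push_toList, Array.toList_empty, List.nil_append]
  by_cases hn : w * h - pc ≤ 0
  · rw [PySem.List.pyRange_one_eq_nil (by omega), if_pos hn]
    simp
  · rw [if_neg hn]
    simp only [Array.toList_append, foldl_extend_toList, Array.toList_empty,
      List.nil_append, List.toList_toArray]
    have hw : 0 < w := by
      rcases hpre with hw | hle
      · exact hw
      · exfalso
        have hle' : w * h ≤ pc := hle
        omega
    set y0 := PySem.Int.floordiv pc w with hy0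
    set x0 := PySem.Int.mod pc w with hx0
    have hy0' : y0 = pc / w := by rw [hy0, PySem.Int.floordiv_eq_ediv_of_pos hw]
    have hx0' : x0 = pc % w := by rw [hx0, PySem.Int.mod_eq_emod_of_pos hw]
    have hx0nn : 0 ≤ x0 := by rw [hx0']; exact Int.emod_nonneg _ (by omega)
    have hx0lt : x0 < w := by rw [hx0']; exact Int.emod_lt_of_pos _ hw
    have hpc : pc = w * y0 + x0 := by
      rw [hy0', hx0']; exact (Int.mul_ediv_add_emod pc w).symm
    have hy0h : y0 ≤ h - 1 := by
      by_contra hc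
      have hmul : w * h ≤ w * y0 := mul_le_mul_of_nonneg_left (by omega) (by omega)
      omega
    -- A's list as descPairs
    have hA : (PySem.List.pyRange 0 (w * h - pc) 1).map
        (fun i => (PySem.Int.mod (w * h - 1 - i) w, PySem.Int.floordiv (w * h - 1 - i) w)) =
        descPairs w (w * h - 1) (w * h - pc).toNat := by
      rw [PySem.List.pyRange_one]
      unfold descPairs
      rw [List.map_map]
      simp only [Int.sub_zero]
      apply List.map_congr_left
      intro i _
      simp only [Function.comp_apply, zero_add]
      rfl
    rw [hA]
    -- split the count into m full rows plus a partial row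
    set m := (h - 1 - y0).toNat with hm
    have hmI : ((m : Nat) : Int) = h - 1 - y0 := by rw [hm]; omega
    have hwI : ((w.toNat : Nat) : Int) = w := by omega
    have hmwI : ((m * w.toNat : Nat) : Int) = (h - 1 - y0) * w := by
      rw [Nat.cast_mul, hwI, hmI]
    have hcnt : (w * h - pc).toNat = m * w.toNat + (w - x0).toNat := by
      have hc : ((m * w.toNat + (w - x0).toNat : Nat) : Int) = w * h - pc := by
        push_cast [hmwI]
        rw [Int.toNat_of_nonneg (by omega : (0:Int) ≤ w - x0)]
        rw [hpc]; ring
      omega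
    rw [hcnt, descPairs_add]
    -- B's full-row loop
    rw [PySem.List.pyRange_neg_one (h - 1) y0]
    have hmlen : (h - 1 - y0).toNat = m := rfl
    rw [hmlen, List.flatMap_map]
    have hrows : (List.range m).flatMap
        (fun (k : Nat) => (PySem.List.pyRange (w - 1) (-1) (-1)).map (fun x => (x, h - 1 - (k : Int)))) =
        descPairs w (w * h - 1) (m * w.toNat) := by
      calc (List.range m).flatMap
            (fun (k : Nat) => (PySem.List.pyRange (w - 1) (-1) (-1)).map (fun x => (x, h - 1 - (k : Int))))
          = (List.range m).flatMap
            (fun (k : Nat) => descPairs w (w * (h - 1 - (k : Int)) + (w - 1)) w.toNat) := by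
            apply List.flatMap_congr
            intro k _
            have := row_eq w (h - 1 - (k : Int)) 0 hw (le_refl 0) (le_of_lt hw)
            simpa using this
        _ = descPairs w (w * (h - 1) + (w - 1)) (m * w.toNat) := rows_eq w hw m (h - 1)
        _ = descPairs w (w * h - 1) (m * w.toNat) := by
            congr 1
            ring
    rw [hrows]
    congr 1
    rw [row_eq w y0 x0 hw hx0nn (le_of_lt hx0lt)]
    congr 1
    rw [hmwI]
    ring
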